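-- pv_equiv track=rewrite | github.com/Dheasra/TPIV---EPFL | Classical Sim TPIVb/qsim/weaksim_ver3_backup_improved.py | gagdetize
-- ===== SOURCE A (Python) =====
-- def gagdetize(circuit, Nq):
--     #gadgetizes the circuit
--     t = 0 #T count
--     g_list = [] #list of qubits added by gadgetization
--     ctrl_list = [] #list of entangled qubits with the new ancilla qubits
--     #Changing the T gates to the T Gadget
--     for k in range(len(circuit[0])):
--         if circuit[0][k] == 'T':
--             ctrl_list.append(int(circuit[1][k]))
--             t += 1
--             Nq += 1 #adding a qubit for every T gate
--             g_list.append(Nq-1) #adding the newly added qubit to the list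
--
--             circuit[0][k] = 'CX' #Replacing the gate
--             control = int(circuit[1][k]) #the control qubit is where the T gate was
--             circuit[1][k] = str(control) + str(Nq-1) #changing the qubits where the gate is applied
--     return circuit, Nq, t, g_list, ctrl_list
-- ===== SOURCE B (Python) =====
-- def gagdetize(circuit, Nq):
--     # Gadgetize: collect T-gate positions first, then build outputs by comprehension
--     # and mutate the two rows in one enumerate loop. (Mutates `circuit` in place, like A.)
--     ts = [k for k in range(len(circuit[0])) if circuit[0][k] == 'T']
--     ctrl_list = [int(circuit[1][k]) for k in ts]
--     g_list = [Nq + i for i in range(len(ts))]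
--     for i, (k, c) in enumerate(zip(ts, ctrl_list)):
--         circuit[0][k] = 'CX'
--         circuit[1][k] = str(c) + str(Nq + i)
--     return circuit, Nq + len(ts), len(ts), g_list, ctrl_list
-- ===== Notes on version B (the rewrite author's own statement) =====
-- stated objective: alternative
-- what changed: B first collects the T-gate indices in one pass, builds ctrl_list and g_list by comprehensions from the unmutated rows, and then performs all in-place row mutations in a single enumerate loop, instead of A's single loop interleaving counting, appends and mutation.
import Mathlib
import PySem

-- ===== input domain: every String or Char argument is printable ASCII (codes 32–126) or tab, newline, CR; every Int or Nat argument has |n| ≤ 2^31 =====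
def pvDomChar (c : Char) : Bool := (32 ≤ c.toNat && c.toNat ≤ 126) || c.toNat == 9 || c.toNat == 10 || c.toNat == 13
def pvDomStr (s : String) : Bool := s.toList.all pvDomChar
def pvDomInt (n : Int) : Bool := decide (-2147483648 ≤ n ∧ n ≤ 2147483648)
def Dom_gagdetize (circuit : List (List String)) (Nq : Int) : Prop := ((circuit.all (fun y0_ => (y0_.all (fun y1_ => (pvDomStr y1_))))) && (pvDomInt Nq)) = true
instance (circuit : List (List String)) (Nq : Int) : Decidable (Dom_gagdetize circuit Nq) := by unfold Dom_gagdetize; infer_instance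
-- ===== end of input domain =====

-- B collects the T-gate indices first, builds ctrl_list/g_list by comprehensions from the
-- unmutated rows, then mutates the two rows in one enumerate loop (alternative decomposition,
-- same cost). Both A and B mutate `circuit` in place identically; the theorem is about the
-- returned value.

-- ===== PORT A =====
-- A's loop body, over the state (row0, row1, Nq, t, g_list, ctrl_list)
def gagdetizeStep : (List String × List String × Int × Int × List Int × List Int) → Nat →
    List String × List String × Int × Int × List Int × List Int
  | (r0, r1, nq, t, g, c), k =>
    if r0.getD k "" == "T" then
      (r0.set k "CX",
       r1.set k (PySem.Int.toStr ((PySem.Int.ofStr? (r1.getD k "")).getD 0) ++ PySem.Int.toStr nq),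
       nq + 1, t + 1, g ++ [nq], c ++ [(PySem.Int.ofStr? (r1.getD k "")).getD 0])
    else (r0, r1, nq, t, g, c)

def gagdetize (circuit : List (List String)) (Nq : Int) : List (List String) × Int × Int × List Int × List Int :=
  let s := (List.range (circuit.getD 0 []).length).foldl gagdetizeStep
             (circuit.getD 0 [], circuit.getD 1 [], Nq, 0, [], [])
  ((circuit.set 0 s.1).set 1 s.2.1, s.2.2.1, s.2.2.2.1, s.2.2.2.2.1, s.2.2.2.2.2)

-- ===== PORT B =====
-- B's enumerate mutation loop: i is the enumerate counter, the pairs are zip(ts, ctrl_list)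
def gagMut (Nq : Int) : List String → List String → Int → List (Nat × Int) → List String × List String
  | r0, r1, _, [] => (r0, r1)
  | r0, r1, i, (k, c) :: rest =>
      gagMut Nq (r0.set k "CX") (r1.set k (PySem.Int.toStr c ++ PySem.Int.toStr (Nq + i))) (i + 1) rest

def gagdetize_alt (circuit : List (List String)) (Nq : Int) : List (List String) × Int × Int × List Int × List Int :=
  let r0 := circuit.getD 0 []
  let r1 := circuit.getD 1 []
  let ts := (List.range r0.length).filter (fun k => r0.getD k "" == "T")
  let ctrl := ts.map (fun k => (PySem.Int.ofStr? (r1.getD k "")).getD 0)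
  let g := (List.range ts.length).map (fun i : Nat => Nq + (i : Int))
  let rs := gagMut Nq r0 r1 0 (ts.zip ctrl)
  ((circuit.set 0 rs.1).set 1 rs.2, Nq + ts.length, (ts.length : Int), g, ctrl)

-- ===== PRECONDITION & SPEC =====
-- Pre_ excludes exactly the inputs where the Python raises: an empty circuit (IndexError on
-- circuit[0]), and circuits with a T gate whose qubit entry is missing (IndexError on circuit[1]
-- or circuit[1][k]) or does not parse as an int (ValueError).
def Pre_gagdetize (circuit : List (List String)) (Nq : Int) : Prop :=
  circuit ≠ [] ∧
  ∀ k ∈ List.range (circuit.getD 0 []).length,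
    (circuit.getD 0 []).getD k "" = "T" →
      2 ≤ circuit.length ∧ k < (circuit.getD 1 []).length ∧
      (PySem.Int.ofStr? ((circuit.getD 1 []).getD k "")).isSome = true
instance (circuit : List (List String)) (Nq : Int) : Decidable (Pre_gagdetize circuit Nq) := by
  unfold Pre_gagdetize; infer_instance

def pvWitness_gagdetize : List (List String) × Int := ([["T", "H", "T"], ["0", "1", "2"]], 3)

def Spec_gagdetize (circuit : List (List String)) (Nq : Int) (out : List (List String) × Int × Int × List Int × List Int) : Prop := out = gagdetize_alt circuit Nq
instance (circuit : List (List String)) (Nq : Int) (out : List (List String) × Int × Int × List Int × List Int) : Decidable (Spec_gagdetize circuit Nq out) := by unfold Spec_gagdetize; infer_instance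

-- ===== CLAIM (what is proved, stated in full; the proofs are below) =====
def Claim_equal_gagdetize : Prop := ∀ (circuit : List (List String)) (Nq : Int), Dom_gagdetize circuit Nq → Pre_gagdetize circuit Nq → Spec_gagdetize circuit Nq (gagdetize circuit Nq)

-- ===== LEMMAS AND PROOFS =====

theorem getD_set_ne {α : Type} (l : List α) {k j : Nat} (h : k ≠ j) (x d : α) :
    (l.set k x).getD j d = l.getD j d := by
  simp [List.getD_eq_getElem?_getD, List.getElem?_set_ne h]

theorem stepT (r0 r1 : List String) (nq t : Int) (g c : List Int) (k : Nat)
    (hT : (r0.getD k "" == "T") = true) :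
    gagdetizeStep (r0, r1, nq, t, g, c) k =
      (r0.set k "CX",
       r1.set k (PySem.Int.toStr ((PySem.Int.ofStr? (r1.getD k "")).getD 0) ++ PySem.Int.toStr nq),
       nq + 1, t + 1, g ++ [nq], c ++ [(PySem.Int.ofStr? (r1.getD k "")).getD 0]) := by
  simp only [gagdetizeStep]; rw [if_pos hT]

theorem stepF (r0 r1 : List String) (nq t : Int) (g c : List Int) (k : Nat)
    (hT : ¬ (r0.getD k "" == "T") = true) :
    gagdetizeStep (r0, r1, nq, t, g, c) k = (r0, r1, nq, t, g, c) := by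
  simp only [gagdetizeStep]; rw [if_neg hT]

theorem gagMut_shift (Nq : Int) (l : List (Nat × Int)) :
    ∀ (r0 r1 : List String) (i : Int), gagMut Nq r0 r1 (i + 1) l = gagMut (Nq + 1) r0 r1 i l := by
  induction l with
  | nil => intro r0 r1 i; rfl
  | cons p rest ih =>
      intro r0 r1 i
      obtain ⟨k, c⟩ := p
      simp only [gagMut]
      rw [show Nq + (i + 1) = Nq + 1 + i by ring, ih]

-- A's fold over any duplicate-free index list equals its fold over the T-positions only
theorem foldA_filter (ts : List Nat) (h : ts.Nodup) :
    ∀ (r0 r1 : List String) (nq t : Int) (g c : List Int),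
      ts.foldl gagdetizeStep (r0, r1, nq, t, g, c) =
      (ts.filter (fun k => r0.getD k "" == "T")).foldl gagdetizeStep (r0, r1, nq, t, g, c) := by
  induction ts with
  | nil => intros; rfl
  | cons k rest ih =>
      intro r0 r1 nq t g c
      have hk : k ∉ rest := (List.nodup_cons.mp h).1
      have hrest := (List.nodup_cons.mp h).2
      by_cases hT : (r0.getD k "" == "T") = true
      · simp only [List.foldl_cons, List.filter_cons, hT, if_true]
        rw [stepT r0 r1 nq t g c k hT, ih hrest]
        congr 1
        apply List.filter_congr
        intro j hj
        rw [getD_set_ne _ (by rintro rfl; exact hk hj) _ _]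
      · simp only [List.foldl_cons, List.filter_cons, hT]
        rw [stepF r0 r1 nq t g c k hT]
        exact ih hrest _ _ _ _ _ _

-- A's fold over an all-T duplicate-free index list, written in B's shape
theorem foldA_closed (ts : List Nat) (h : ts.Nodup) :
    ∀ (r0 r1 : List String) (nq t : Int) (g c : List Int),
      (∀ k ∈ ts, (r0.getD k "" == "T") = true) →
      ts.foldl gagdetizeStep (r0, r1, nq, t, g, c) =
      ((gagMut nq r0 r1 0 (ts.zip (ts.map (fun j => (PySem.Int.ofStr? (r1.getD j "")).getD 0)))).1,
       (gagMut nq r0 r1 0 (ts.zip (ts.map (fun j => (PySem.Int.ofStr? (r1.getD j "")).getD 0)))).2,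
       nq + ts.length, t + ts.length,
       g ++ (List.range ts.length).map (fun i : Nat => nq + (i : Int)),
       c ++ ts.map (fun j => (PySem.Int.ofStr? (r1.getD j "")).getD 0)) := by
  induction ts with
  | nil => intro r0 r1 nq t g c _; simp [gagMut]
  | cons k rest ih =>
      intro r0 r1 nq t g c hall
      have hk : k ∉ rest := (List.nodup_cons.mp h).1
      have hrest := (List.nodup_cons.mp h).2
      have hT : (r0.getD k "" == "T") = true := hall k (List.mem_cons_self ..)
      have hall' : ∀ j ∈ rest, ((r0.set k "CX").getD j "" == "T") = true := by
        intro j hj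
        rw [getD_set_ne _ (by rintro rfl; exact hk hj) _ _]
        exact hall j (List.mem_cons_of_mem _ hj)
      rw [List.foldl_cons, stepT r0 r1 nq t g c k hT, ih hrest _ _ _ _ _ _ hall']
      have hvals : rest.map (fun j =>
            (PySem.Int.ofStr? (((r1.set k (PySem.Int.toStr ((PySem.Int.ofStr? (r1.getD k "")).getD 0) ++ PySem.Int.toStr nq))).getD j "")).getD 0) =
          rest.map (fun j => (PySem.Int.ofStr? (r1.getD j "")).getD 0) := by
        apply List.map_congr_left
        intro j hj
        rw [getD_set_ne _ (by rintro rfl; exact hk hj) _ _]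
      have hmut : gagMut nq r0 r1 0
            ((k :: rest).zip ((k :: rest).map (fun j => (PySem.Int.ofStr? (r1.getD j "")).getD 0))) =
          gagMut (nq + 1) (r0.set k "CX")
            (r1.set k (PySem.Int.toStr ((PySem.Int.ofStr? (r1.getD k "")).getD 0) ++ PySem.Int.toStr nq)) 0
            (rest.zip (rest.map (fun j => (PySem.Int.ofStr? (r1.getD j "")).getD 0))) := by
        simp only [List.map_cons, List.zip_cons_cons, gagMut]
        rw [show nq + (0 : Int) = nq by ring, gagMut_shift]
      refine Prod.ext ?_ (Prod.ext ?_ (Prod.ext ?_ (Prod.ext ?_ (Prod.ext ?_ ?_))))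
      · rw [hvals, ← hmut]
      · rw [hvals, ← hmut]
      · dsimp only; push_cast [List.length_cons]; ring
      · dsimp only; push_cast [List.length_cons]; ring
      · dsimp only
        rw [List.length_cons, List.range_succ_eq_map, List.map_cons, List.map_map,
            List.append_assoc, List.singleton_append,
            show ((fun i : Nat => nq + (i : Int)) ∘ Nat.succ) = fun i : Nat => nq + 1 + (i : Int) from
              funext fun i => by simp only [Function.comp]; push_cast; ring]
        norm_num
      · dsimp only
        rw [hvals, List.map_cons, List.append_assoc]
        rfl

-- ===== VERDICT (by name: the statement is the Claim_ definition above) =====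
theorem gagdetize_spec : Claim_equal_gagdetize := by
  intro circuit Nq _ _
  simp only [Spec_gagdetize, gagdetize, gagdetize_alt]
  rw [foldA_filter _ List.nodup_range,
      foldA_closed _ (List.nodup_range.filter _) _ _ _ _ _ _
        (fun k hk => (List.mem_filter.mp hk).2)]
  simp only [List.nil_append, zero_add]
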